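/- GENERATED by farm/mkstatement.py from design/units.tsv (unit `decode_residue.1c`) and the assertions of Vorbis/Spec/DecodeResidue1.lean — do not edit.
   THE STATEMENT of the proof unit `decode_residue.1c`: segment 1c of `decode_residue` (34 instructions; entries 0x10ed48;
   exits 0x10edca; ranges 0x10ed48-0x10edc5 + 0x10ee11-0x10ee34)
   takes each of its entry assertions to one of its exit assertions (`Vorbis.Spec.DecodeResidue.Seg1c`), given the contracts of its callees.
   What the names mean: Vorbis/Spec/Basic.lean (the shared hypotheses), Vorbis/Spec/DecodeResidue1.lean (the assertions). The theorem to prove: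
   `theorem decode_residue_1c_ok : Vorbis.Spec.decode_residue_1c.Statement`. -/
import Vorbis.Spec.Alloc
import Vorbis.Spec.DecodeResidue1
namespace Vorbis.Spec.decode_residue_1c
open X86 X86.User Asan

/-- The statement of unit `decode_residue.1c`. -/
def Statement : Prop :=
  ∀ (Lay : Layout) (_hLay : Lay.hi = 0x1000000) (μ : Microarch) (_hμ : UserX.MicroOK μ) (u₀ : State)
    (_hcode : HasCodeNat Lay u₀ Vorbis.L.decode_residue.entry Vorbis.Code.code_decode_residue.nat Vorbis.L.decode_residue.size)
    (_h_asan_load8_noabort : Asan.SmallCheck Lay μ Vorbis.WayInv (Vorbis.CodeOK u₀) [.rax, .rcx, .rdx] 8 Vorbis.L.__asan_load8_noabort.entry)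
    (_h_asan_load4_noabort : Asan.SmallCheck Lay μ Vorbis.WayInv (Vorbis.CodeOK u₀) [.rax, .rcx, .rdx] 4 Vorbis.L.__asan_load4_noabort.entry)
    (_h_setup_temp_malloc : ∀ (others : List Obj) (frames : List (Nat × FrameLayout)) (A : Arena), Calls Lay μ Vorbis.WayInv (Vorbis.conv u₀) Vorbis.L.setup_temp_malloc.entry (Vorbis.Spec.setup_temp_malloc.spec others frames A)),
    Vorbis.Spec.DecodeResidue.Seg1c Lay μ u₀

end Vorbis.Spec.decode_residue_1c
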